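-- pv_equiv track=rewrite | github.com/pypi-data/pypi-mirror-131 | packages/elm.tree/elm.tree-0.0.1.tar.gz/elm.tree-0.0.1/elm/__init__.py | build_cypher
-- ===== SOURCE A (Python) =====
-- import string
--
-- def build_cypher(zero):
--   cypher = {}
--   cypher[" "] = "000Space000"
--   cy = ""
--   total = list(string.ascii_lowercase)
--   for item in string.ascii_uppercase:
--     total.append(item)
--   for alpha in total:
--     cy = f"1{zero}1"
--     cypher[alpha] = cy
--     zero += "0"
--   for value in string.punctuation:
--     cy = f"1{zero}1"
--     cypher[value] = cy
--     zero += "0"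
--
--   return cypher
-- ===== SOURCE B (Python) =====
-- import string
--
-- def build_cypher(zero):
--     # one pass with enumerate: value for index i is "1" + zero + "0"*i + "1"
--     cypher = {" ": "000Space000"}
--     for i, ch in enumerate(string.ascii_lowercase + string.ascii_uppercase + string.punctuation):
--         cypher[ch] = "1" + zero + "0" * i + "1"
--     return cypher
-- ===== Notes on version B (the rewrite author's own statement) =====
-- stated objective: simpler
-- what changed: Replaces the mutated accumulator threaded through two separate loops (plus a list-building loop for the letters) with a single enumerate pass over one concatenated character sequence, computing each character's code directly from its index.
import Mathlib
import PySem

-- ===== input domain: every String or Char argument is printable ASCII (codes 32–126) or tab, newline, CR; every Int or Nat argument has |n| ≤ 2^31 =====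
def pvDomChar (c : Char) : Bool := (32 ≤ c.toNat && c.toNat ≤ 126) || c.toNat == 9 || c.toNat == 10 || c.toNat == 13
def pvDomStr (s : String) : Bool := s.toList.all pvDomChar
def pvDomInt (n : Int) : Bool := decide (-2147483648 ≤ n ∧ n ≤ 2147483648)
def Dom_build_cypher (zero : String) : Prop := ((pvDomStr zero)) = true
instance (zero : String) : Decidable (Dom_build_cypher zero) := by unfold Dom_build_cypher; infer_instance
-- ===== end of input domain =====

-- B replaces A's mutated accumulator threaded through two loops (plus a letter-list-building loop)
-- by a single enumerate pass over one concatenated character sequence, computing each code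
-- directly from its index (objective: simpler).


def pvAsciiLowercase : String := "abcdefghijklmnopqrstuvwxyz"
def pvAsciiUppercase : String := "ABCDEFGHIJKLMNOPQRSTUVWXYZ"
def pvPunctuation : String := "!\"#$%&'()*+,-./:;<=>?@[\\]^_`{|}~"

-- ===== PORT A =====
-- the identical body of A's two value-assigning loops
def pvStepA (s : PySem.Dict String String × String) (c : Char) : PySem.Dict String String × String :=
  (s.1.insert (String.ofList [c]) ("1" ++ s.2 ++ "1"), s.2 ++ "0")

def build_cypher (zero : String) : List (String × String) :=
  let cypher : PySem.Dict String String := PySem.Dict.empty.insert " " "000Space000"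
  let total : List Char :=
    pvAsciiUppercase.toList.foldl (fun t item => t ++ [item]) pvAsciiLowercase.toList
  let s1 := total.foldl pvStepA (cypher, zero)
  let s2 := pvPunctuation.toList.foldl pvStepA s1
  s2.1.items

-- ===== PORT B =====
-- "0" * n
def pvZeros (n : Nat) : String := String.ofList (List.replicate n '0')

def build_cypher_alt (zero : String) : List (String × String) :=
  (" ", "000Space000") ::
    (PySem.List.enumerate (pvAsciiLowercase ++ pvAsciiUppercase ++ pvPunctuation).toList).map
      (fun p => (String.ofList [p.2], "1" ++ zero ++ pvZeros p.1.toNat ++ "1"))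

-- ===== PRECONDITION & SPEC =====
def Spec_build_cypher (zero : String) (out : List (String × String)) : Prop := out = build_cypher_alt zero
instance (zero : String) (out : List (String × String)) : Decidable (Spec_build_cypher zero out) := by unfold Spec_build_cypher; infer_instance

-- ===== CLAIM (what is proved, stated in full; the proofs are below) =====
def Claim_equal_build_cypher : Prop := ∀ (zero : String), Dom_build_cypher zero → Spec_build_cypher zero (build_cypher zero)

-- ===== LEMMAS AND PROOFS =====

theorem pv_zeros_succ (n : Nat) : pvZeros n ++ "0" = pvZeros (n + 1) := by
  unfold pvZeros
  ext1
  simp [List.replicate_succ']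

theorem pv_append_zeros_zero (z : String) : z ++ pvZeros 0 = z := by
  unfold pvZeros
  ext1; simp

theorem pv_append_assoc (a b c : String) : a ++ b ++ c = a ++ (b ++ c) := by
  ext1; simp

theorem pv_foldl_stepA (cs : List Char) :
    ∀ (d : PySem.Dict String String) (z : String) (n : Nat),
    (∀ c ∈ cs, d.contains (String.ofList [c]) = false) →
    ((cs.map (fun c => String.ofList [c])).Nodup) →
    (cs.foldl pvStepA (d, z ++ pvZeros n)).1.items
      = d.items ++ (PySem.List.enumerate cs (n : Int)).map
          (fun p => (String.ofList [p.2], "1" ++ z ++ pvZeros p.1.toNat ++ "1")) := by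
  induction cs with
  | nil => intro d z n _ _; simp [PySem.List.enumerate_nil]
  | cons c cs ih =>
    intro d z n hfresh hnd
    have hc : d.contains (String.ofList [c]) = false := hfresh c (by simp)
    have hstep : (c :: cs).foldl pvStepA (d, z ++ pvZeros n)
        = cs.foldl pvStepA
            (d.insert (String.ofList [c]) ("1" ++ (z ++ pvZeros n) ++ "1"),
             z ++ pvZeros (n + 1)) := by
      simp [pvStepA, pv_append_assoc, pv_zeros_succ]
    rw [hstep]
    have hfresh' : ∀ c' ∈ cs,
        (d.insert (String.ofList [c]) ("1" ++ (z ++ pvZeros n) ++ "1")).contains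
          (String.ofList [c']) = false := by
      intro c' hc'
      rw [PySem.Dict.contains_insert]
      have h1 : d.contains (String.ofList [c']) = false := hfresh c' (by simp [hc'])
      have h2 : String.ofList [c'] ≠ String.ofList [c] := by
        simp only [List.map, List.nodup_cons] at hnd
        intro he
        exact hnd.1 (he ▸ List.mem_map_of_mem hc')
      simp [h1, h2]
    have hnd' : (cs.map (fun c => String.ofList [c])).Nodup := by
      simp only [List.map, List.nodup_cons] at hnd
      exact hnd.2
    rw [ih _ z (n + 1) hfresh' hnd']
    rw [PySem.Dict.items_insert_of_not_contains _ _ hc]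
    rw [PySem.List.enumerate_cons]
    simp only [List.map_cons, List.append_assoc, List.cons_append, List.nil_append]
    have hcast : (n : Int) + 1 = ((n + 1 : Nat) : Int) := by push_cast; ring
    rw [hcast]
    simp [pv_append_assoc]

theorem pv_total_eq :
    pvAsciiUppercase.toList.foldl (fun t item => t ++ [item]) pvAsciiLowercase.toList
      = pvAsciiLowercase.toList ++ pvAsciiUppercase.toList :=
  PySem.List.foldl_append_singleton _ _

theorem pv_ofList_singleton_inj {a b : Char} (h : String.ofList [a] = String.ofList [b]) : a = b := by
  have h' := congrArg String.toList h
  simpa using h'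

set_option maxRecDepth 2000 in
theorem pv_no_space : ' ' ∉ pvAsciiLowercase.toList ++ pvAsciiUppercase.toList ++ pvPunctuation.toList := by
  decide

theorem pv_fresh : ∀ c ∈ pvAsciiLowercase.toList ++ pvAsciiUppercase.toList ++ pvPunctuation.toList,
    ((PySem.Dict.empty : PySem.Dict String String).insert " " "000Space000").contains
      (String.ofList [c]) = false := by
  intro c hc
  rw [PySem.Dict.contains_insert]
  have hsp : c ≠ ' ' := fun he => pv_no_space (he ▸ hc)
  have h2 : (String.ofList [c] == " ") = false := by
    simp only [beq_eq_false_iff_ne, ne_eq]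
    intro he
    have he' : String.ofList [c] = String.ofList [' '] := he
    exact hsp (pv_ofList_singleton_inj he')
  simp [h2]

set_option maxRecDepth 2000 in
theorem pv_chars_nodup : (pvAsciiLowercase.toList ++ pvAsciiUppercase.toList ++ pvPunctuation.toList).Nodup := by
  decide

theorem pv_nodup : ((pvAsciiLowercase.toList ++ pvAsciiUppercase.toList ++ pvPunctuation.toList).map
    (fun c => String.ofList [c])).Nodup :=
  pv_chars_nodup.map (fun _ _ h => pv_ofList_singleton_inj h)

-- ===== VERDICT (by name: the statement is the Claim_ definition above) =====
theorem build_cypher_spec : Claim_equal_build_cypher := by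
  intro zero _
  unfold Spec_build_cypher build_cypher build_cypher_alt
  simp only [pv_total_eq, ← List.foldl_append]
  have hmain := pv_foldl_stepA
      (pvAsciiLowercase.toList ++ pvAsciiUppercase.toList ++ pvPunctuation.toList)
      ((PySem.Dict.empty : PySem.Dict String String).insert " " "000Space000")
      zero 0 pv_fresh pv_nodup
  rw [pv_append_zeros_zero] at hmain
  have hlist : (pvAsciiLowercase ++ pvAsciiUppercase ++ pvPunctuation).toList
      = pvAsciiLowercase.toList ++ pvAsciiUppercase.toList ++ pvPunctuation.toList := by
    simp
  rw [hlist, hmain]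
  have hitems : ((PySem.Dict.empty : PySem.Dict String String).insert " " "000Space000").items
      = [(" ", "000Space000")] := rfl
  rw [hitems]
  simp
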